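-- pv_equiv track=rewrite | github.com/a-to-z-study/algorithm | yeon/programmers/level2/ArcheryCompetition.py | solution
-- ===== SOURCE A (Python) =====
-- from itertools import product
--
-- def solution(n, info):
--     info.reverse()  # 0점부터 10점까지 (오름차순으로 변경)
--
--     all_cases = list(product([True, False], repeat=10))  # True: 어피치보다 화살을 1개 더 쏜다 / False: 아예 화살을 쏘지 않는다
--     win_cases = []  # 라이언이 이기는 경우
--     gap = 0  # 점수 차이
--
--     for case in all_cases:
--         arrows = n  # 남은 화살의 수
--         lion = [0] * 11
--         lion_point = 0  # 라이언의 점수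
--         apeach_point = 0  # 어피치의 점수
--
--         for index, shoot in enumerate(case):
--             apeach_shoot = info[index + 1]
--
--             if shoot and arrows > apeach_shoot:
--                 lion[index + 1] = apeach_shoot + 1
--                 arrows -= apeach_shoot + 1
--                 lion_point += index + 1
--             elif shoot and arrows <= apeach_shoot:
--                 break
--             elif apeach_shoot:
--                 apeach_point += index + 1
--         else:
--             lion[0] = arrows  # 남은 화살을 모두 0점에 쏘기
--
--             if lion_point > apeach_point:
--                 if gap < lion_point - apeach_point:
--                     gap = lion_point - apeach_point
--                     win_cases = [lion]
--                 elif gap == lion_point - apeach_point: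
--                     win_cases.append(lion)
--
--     if not win_cases:
--         return [-1]
--
--     win_cases.sort(reverse=True)
--
--     return list(reversed(win_cases[0]))
-- ===== SOURCE B (Python) =====
-- def solution(n, info):
--     info.reverse()
--     best = None  # (gap, lion counts in ascending score order)
--
--     def dfs(i, arrows, shots, lion_pt, apeach_pt):
--         nonlocal best
--         if i == 11:
--             if lion_pt > apeach_pt:
--                 cand = (lion_pt - apeach_pt, [arrows] + shots)
--                 if best is None or cand > best:
--                     best = cand
--             return
--         a = info[i]
--         if arrows > a:
--             dfs(i + 1, arrows - (a + 1), shots + [a + 1], lion_pt + i, apeach_pt)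
--         dfs(i + 1, arrows, shots + [0], lion_pt, apeach_pt + (i if a else 0))
--
--     dfs(1, n, [], 0, 0)
--     if best is None:
--         return [-1]
--     return list(reversed(best[1]))
-- ===== Notes on version B (the rewrite author's own statement) =====
-- stated objective: alternative
-- what changed: B replaces A's enumeration of all 2^10 boolean tuples (collecting every winning lion configuration and sorting them) by a recursive DFS over the ten score zones that only branches into 'shoot' when enough arrows remain and keeps a single running best (gap, lion) candidate, so the winners list and the final sort disappear.
import Mathlib
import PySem

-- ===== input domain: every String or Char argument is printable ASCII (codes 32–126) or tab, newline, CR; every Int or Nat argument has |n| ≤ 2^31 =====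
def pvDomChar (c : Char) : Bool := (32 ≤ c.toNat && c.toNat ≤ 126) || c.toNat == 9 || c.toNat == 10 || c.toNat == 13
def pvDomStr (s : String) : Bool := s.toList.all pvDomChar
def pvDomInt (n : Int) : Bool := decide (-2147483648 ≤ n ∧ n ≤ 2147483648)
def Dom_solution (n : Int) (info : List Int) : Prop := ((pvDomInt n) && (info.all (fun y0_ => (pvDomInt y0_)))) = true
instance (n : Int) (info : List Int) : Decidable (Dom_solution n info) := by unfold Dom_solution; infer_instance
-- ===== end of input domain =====

-- B replaces A's enumeration of all 2^10 boolean tuples by a recursive DFS over the score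
-- zones that only branches into 'shoot' when enough arrows remain, and keeps one running best
-- (gap, lion) candidate instead of collecting a list of winners and sorting it.
-- Python A mutates its argument (info.reverse() in place; B does the same); the equivalence
-- proved here is about the RETURN value.

-- ===== PORT A =====
-- all_cases = list(product([True, False], repeat=k))
def pvAllCases : Nat → List (List Bool)
  | 0 => [[]]
  | k+1 => [true, false].flatMap (fun t => (pvAllCases k).map (fun c => t :: c))

-- the inner 'for index, shoot in enumerate(case)' loop; none = the 'break' was taken
def pvALoop (infoR : List Int) : List Bool → Nat → List Int → Int → Int → Int →
    Option (List Int × Int × Int × Int)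
  | [], _, lion, arrows, lionPt, apeachPt => some (lion, arrows, lionPt, apeachPt)
  | shoot :: rest, index, lion, arrows, lionPt, apeachPt =>
    let a := (PySem.List.pyGet? infoR ((index : Int) + 1)).getD 0   -- IndexError excluded by Pre_
    if shoot ∧ arrows > a then
      pvALoop infoR rest (index+1) (lion.set (index+1) (a+1)) (arrows - (a+1))
        (lionPt + ((index : Int) + 1)) apeachPt
    else if shoot then none
    else if a ≠ 0 then
      pvALoop infoR rest (index+1) lion arrows lionPt (apeachPt + ((index : Int) + 1))
    else pvALoop infoR rest (index+1) lion arrows lionPt apeachPt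

-- one iteration of the outer 'for case in all_cases' loop, state = (gap, win_cases)
def pvStepA (infoR : List Int) (n : Int) (s : Int × List (List Int)) (case : List Bool) :
    Int × List (List Int) :=
  match pvALoop infoR case 0 (List.replicate 11 0) n 0 0 with
  | none => s
  | some (lion, arrows, lionPt, apeachPt) =>
    let lion := lion.set 0 arrows
    if lionPt > apeachPt then
      if s.1 < lionPt - apeachPt then (lionPt - apeachPt, [lion])
      else if s.1 = lionPt - apeachPt then (s.1, s.2 ++ [lion])
      else s
    else s

def solution (n : Int) (info : List Int) : List Int :=
  let infoR := info.reverse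
  let s := (pvAllCases 10).foldl (pvStepA infoR n) (0, [])
  if s.2 = [] then [-1]
  else ((PySem.List.sorted s.2 (fun x => x) true).headD []).reverse

-- ===== PORT B =====
-- Python 'cand > best' on (gap, lion) tuples: best < cand lexicographically
def pvPairLt (b c : Int × List Int) : Bool :=
  decide (b.1 < c.1) || (decide (b.1 = c.1) && decide (b.2 < c.2))

def pvUpdB (best : Option (Int × List Int)) (cand : Int × List Int) : Option (Int × List Int) :=
  match best with
  | none => some cand
  | some b => if pvPairLt b cand then some cand else some b

-- dfs(i, …) with k = 11 - i remaining zones; shots collects zones 1..i-1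
def pvDfsB (infoR : List Int) : Nat → Int → List Int → Int → Int →
    Option (Int × List Int) → Option (Int × List Int)
  | 0, arrows, shots, lionPt, apeachPt, best =>
    if lionPt > apeachPt then pvUpdB best (lionPt - apeachPt, arrows :: shots) else best
  | k+1, arrows, shots, lionPt, apeachPt, best =>
    let i : Int := 11 - ((k : Int) + 1)
    let a := (PySem.List.pyGet? infoR i).getD 0   -- IndexError excluded by Pre_
    let best := if arrows > a then
        pvDfsB infoR k (arrows - (a+1)) (shots ++ [a+1]) (lionPt + i) apeachPt best
      else best
    pvDfsB infoR k arrows (shots ++ [0]) lionPt (apeachPt + (if a ≠ 0 then i else 0)) best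

def solution_alt (n : Int) (info : List Int) : List Int :=
  let infoR := info.reverse
  match pvDfsB infoR 10 n [] 0 0 none with
  | none => [-1]
  | some b => b.2.reverse

-- ===== PRECONDITION & SPEC =====
-- Pre_ excludes exactly the inputs on which Python A raises IndexError (info[index+1] for
-- index+1 up to 10 needs at least 11 entries); A returns normally on every longer list.
def Pre_solution (n : Int) (info : List Int) : Prop := 11 ≤ info.length
instance (n : Int) (info : List Int) : Decidable (Pre_solution n info) := by
  unfold Pre_solution; infer_instance

def pvWitness_solution : Int × List Int := (5, [2, 1, 1, 1, 0, 0, 0, 0, 0, 0, 0])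

def Spec_solution (n : Int) (info : List Int) (out : List Int) : Prop := out = solution_alt n info
instance (n : Int) (info : List Int) (out : List Int) : Decidable (Spec_solution n info out) := by
  unfold Spec_solution; infer_instance

-- ===== CLAIM (what is proved, stated in full; the proofs are below) =====
def Claim_equal_solution : Prop := ∀ (n : Int) (info : List Int), Dom_solution n info →
  Pre_solution n info → Spec_solution n info (solution n info)

-- ===== LEMMAS AND PROOFS =====

-- specification-level description of one case: (final arrows, lion_point, apeach_point,
-- arrows shot in zones i, i+1, …); none = the case hits A's 'break'
def pvCaseOut (infoR : List Int) : List Bool → Int → Int → Int → Int →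
    Option (Int × Int × Int × List Int)
  | [], _, arrows, lionPt, apeachPt => some (arrows, lionPt, apeachPt, [])
  | b :: rest, i, arrows, lionPt, apeachPt =>
    let a := (PySem.List.pyGet? infoR i).getD 0
    if b then
      if arrows > a then
        (pvCaseOut infoR rest (i+1) (arrows - (a+1)) (lionPt + i) apeachPt).map
          (fun r => (r.1, r.2.1, r.2.2.1, (a+1) :: r.2.2.2))
      else none
    else
      (pvCaseOut infoR rest (i+1) arrows lionPt (apeachPt + (if a ≠ 0 then i else 0))).map
        (fun r => (r.1, r.2.1, r.2.2.1, 0 :: r.2.2.2))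

def pvMkWin (shots : List Int) (r : Int × Int × Int × List Int) : Option (Int × List Int) :=
  if r.2.1 > r.2.2.1 then some (r.2.1 - r.2.2.1, r.1 :: (shots ++ r.2.2.2)) else none

def pvWins (infoR : List Int) (k : Nat) (i arrows lionPt apeachPt : Int) (shots : List Int) :
    List (Int × List Int) :=
  (pvAllCases k).filterMap (fun bits =>
    (pvCaseOut infoR bits i arrows lionPt apeachPt).bind (pvMkWin shots))

def pvUpdA (s : Int × List (List Int)) (w : Int × List Int) : Int × List (List Int) :=
  if s.1 < w.1 then (w.1, [w.2]) else if s.1 = w.1 then (s.1, s.2 ++ [w.2]) else s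

lemma pvAllCases_length {k : Nat} {c : List Bool} (h : c ∈ pvAllCases k) : c.length = k := by
  induction k generalizing c with
  | zero => simp [pvAllCases] at h; simp [h]
  | succ k ih =>
    simp [pvAllCases] at h
    rcases h with ⟨d, hd, rfl⟩ | ⟨d, hd, rfl⟩ <;> simp [ih hd]

lemma pvMkWin_cons (shots : List Int) (v : Int) (r : Int × Int × Int × List Int) :
    pvMkWin shots (r.1, r.2.1, r.2.2.1, v :: r.2.2.2) = pvMkWin (shots ++ [v]) r := by
  simp only [pvMkWin]
  split <;> simp

lemma pvWins_cons (infoR : List Int) (k : Nat) (i arrows lionPt apeachPt : Int)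
    (shots : List Int) :
    pvWins infoR (k+1) i arrows lionPt apeachPt shots =
      (let a := (PySem.List.pyGet? infoR i).getD 0
       (if arrows > a then
          pvWins infoR k (i+1) (arrows - (a+1)) (lionPt + i) apeachPt (shots ++ [a+1])
        else []) ++
       pvWins infoR k (i+1) arrows lionPt
         (apeachPt + (if a ≠ 0 then i else 0)) (shots ++ [0])) := by
  simp only [pvWins, pvAllCases]
  rw [List.flatMap_cons, List.flatMap_cons, List.flatMap_nil, List.append_nil,
    List.filterMap_append, List.filterMap_map, List.filterMap_map]
  congr 1
  · split
    next h =>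
      apply List.filterMap_congr
      intro bits _
      simp only [Function.comp, pvCaseOut, if_pos h]
      cases hc : pvCaseOut infoR bits (i+1) (arrows - ((PySem.List.pyGet? infoR i).getD 0 + 1))
          (lionPt + i) apeachPt with
      | none => simp
      | some r => simp [pvMkWin_cons]
    next h =>
      rw [List.filterMap_eq_nil_iff.mpr]
      intro bits _
      simp only [Function.comp, pvCaseOut, if_pos rfl, if_neg h]
      rfl
  · apply List.filterMap_congr
    intro bits _
    simp only [Function.comp, pvCaseOut, if_neg (by simp : ¬ (false = true))]
    cases hc : pvCaseOut infoR bits (i+1) arrows lionPt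
        (apeachPt + (if (PySem.List.pyGet? infoR i).getD 0 ≠ 0 then i else 0)) with
    | none => simp
    | some r => simp [pvMkWin_cons]

lemma pvDfsB_eq (infoR : List Int) (k : Nat) : ∀ (arrows lionPt apeachPt : Int)
    (shots : List Int) (best : Option (Int × List Int)),
    pvDfsB infoR k arrows shots lionPt apeachPt best =
      List.foldl pvUpdB best (pvWins infoR k (11 - (k : Int)) arrows lionPt apeachPt shots) := by
  induction k with
  | zero =>
    intro arrows lionPt apeachPt shots best
    simp only [pvDfsB, pvWins, pvAllCases, List.filterMap, pvCaseOut, Option.bind, pvMkWin]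
    split
    next h => simp [List.filterMap_cons, pvMkWin, h]
    next h => simp [List.filterMap_cons, pvMkWin, h]
  | succ k ih =>
    intro arrows lionPt apeachPt shots best
    rw [pvWins_cons]
    simp only [pvDfsB]
    have hc : ((k+1 : Nat) : Int) = (k : Int) + 1 := by push_cast; ring
    rw [hc]
    have hi : (11:Int) - ((k:Int)+1) + 1 = 11 - (k:Int) := by ring
    rw [hi]
    rw [List.foldl_append]
    by_cases h : arrows > (PySem.List.pyGet? infoR (11 - ((k:Int)+1))).getD 0
    · rw [if_pos h, if_pos h, ih, ih]
    · rw [if_neg h, if_neg h, List.foldl_nil, ih]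

lemma pvSet_mid (pre t : List Int) (v : Int) :
    (pre ++ 0 :: t).set pre.length v = pre ++ v :: t := by
  induction pre with
  | nil => rfl
  | cons x xs ih => simp [ih]

lemma pvALoop_eq (infoR : List Int) (case : List Bool) : ∀ (index : Nat) (pre : List Int)
    (arrows lionPt apeachPt : Int), pre.length = index + 1 →
    pvALoop infoR case index (pre ++ List.replicate case.length 0) arrows lionPt apeachPt =
      (pvCaseOut infoR case ((index : Int) + 1) arrows lionPt apeachPt).map
        (fun r => (pre ++ r.2.2.2, r.1, r.2.1, r.2.2.1)) := by
  induction case with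
  | nil =>
    intro index pre arrows lionPt apeachPt hpre
    simp [pvALoop, pvCaseOut]
  | cons shoot rest ih =>
    intro index pre arrows lionPt apeachPt hpre
    simp only [pvALoop, pvCaseOut, List.length_cons, List.replicate_succ]
    have hcast : ((index + 1 : Nat) : Int) + 1 = ((index : Int) + 1) + 1 := by push_cast; ring
    set a := (PySem.List.pyGet? infoR ((index : Int) + 1)).getD 0 with ha
    by_cases hs : shoot = true
    · subst hs
      by_cases hgt : arrows > a
      · rw [if_pos ⟨rfl, hgt⟩, if_pos rfl, if_pos hgt]
        have hset : (pre ++ 0 :: List.replicate rest.length 0).set (index + 1) (a + 1)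
            = (pre ++ [a+1]) ++ List.replicate rest.length 0 := by
          rw [← hpre, pvSet_mid]
          simp
        rw [hset, ih (index+1) (pre ++ [a+1]) _ _ _ (by simp [hpre]), hcast]
        cases pvCaseOut infoR rest (((index : Int) + 1) + 1) (arrows - (a+1))
            (lionPt + ((index : Int) + 1)) apeachPt with
        | none => rfl
        | some r => simp
      · rw [if_neg (by simp [hgt]), if_pos rfl, if_pos rfl, if_neg hgt]
        rfl
    · have hs' : shoot = false := by simpa using hs
      subst hs'
      simp only [Bool.false_eq_true, false_and, if_false]
      have hre : pre ++ 0 :: List.replicate rest.length 0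
          = (pre ++ [0]) ++ List.replicate rest.length 0 := by simp
      by_cases hz : a ≠ 0
      · rw [if_pos hz, if_pos hz, hre, ih (index+1) (pre ++ [0]) _ _ _ (by simp [hpre]), hcast]
        cases pvCaseOut infoR rest (((index : Int) + 1) + 1) arrows lionPt
            (apeachPt + ((index : Int) + 1)) with
        | none => rfl
        | some r => simp
      · rw [if_neg hz, if_neg hz, hre, ih (index+1) (pre ++ [0]) _ _ _ (by simp [hpre]), hcast]
        rw [show apeachPt + (0:Int) = apeachPt from by ring]
        cases pvCaseOut infoR rest (((index : Int) + 1) + 1) arrows lionPt apeachPt with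
        | none => rfl
        | some r => simp

lemma pvStepA_eq (infoR : List Int) (n : Int) (s : Int × List (List Int)) (c : List Bool)
    (hc : c.length = 10) :
    pvStepA infoR n s c =
      match (pvCaseOut infoR c 1 n 0 0).bind (pvMkWin []) with
      | none => s
      | some w => pvUpdA s w := by
  have h0 : (List.replicate 11 (0:Int)) = [0] ++ List.replicate c.length 0 := by
    rw [hc]; rfl
  have hl := pvALoop_eq infoR c 0 [0] n 0 0 (by simp)
  simp only [Nat.cast_zero, zero_add] at hl
  rw [pvStepA, h0, hl]
  cases hco : pvCaseOut infoR c 1 n 0 0 with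
  | none => rfl
  | some r =>
    obtain ⟨ar, lp, ap, sh⟩ := r
    simp only [Option.map_some, Option.bind_some, pvMkWin, pvUpdA]
    by_cases hw : lp > ap
    · rw [if_pos hw, if_pos hw]
      simp only [List.cons_append, List.nil_append, List.set]
    · rw [if_neg hw, if_neg hw]

lemma pvFoldA_eq (infoR : List Int) (n : Int) (cs : List (List Bool)) :
    ∀ (s : Int × List (List Int)), (∀ c ∈ cs, c.length = 10) →
    cs.foldl (pvStepA infoR n) s =
      List.foldl pvUpdA s (cs.filterMap (fun c =>
        (pvCaseOut infoR c 1 n 0 0).bind (pvMkWin []))) := by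
  induction cs with
  | nil => intro s _; rfl
  | cons c cs ih =>
    intro s hlen
    rw [List.foldl_cons, List.filterMap_cons, pvStepA_eq infoR n s c (hlen c List.mem_cons_self)]
    cases hco : (pvCaseOut infoR c 1 n 0 0).bind (pvMkWin []) with
    | none => exact ih s (fun d hd => hlen d (List.mem_cons_of_mem _ hd))
    | some w =>
      rw [List.foldl_cons]
      exact ih _ (fun d hd => hlen d (List.mem_cons_of_mem _ hd))

lemma pvWins_gap_ge_one (infoR : List Int) (k : Nat) (i arrows lionPt apeachPt : Int)
    (shots : List Int) {w : Int × List Int}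
    (hw : w ∈ pvWins infoR k i arrows lionPt apeachPt shots) : 1 ≤ w.1 := by
  simp only [pvWins, List.mem_filterMap] at hw
  obtain ⟨bits, -, hb⟩ := hw
  cases hco : pvCaseOut infoR bits i arrows lionPt apeachPt with
  | none => rw [hco] at hb; cases hb
  | some r =>
    rw [hco] at hb
    simp only [Option.bind_some, pvMkWin] at hb
    split at hb
    next h => cases hb; simp; omega
    next => cases hb

-- order facts for the core lexicographic '<' on List Int
lemma pvListLt_irrefl (a : List Int) : ¬ a < a := by
  induction a with
  | nil => intro h; cases h
  | cons x xs ih => intro h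
                    cases h with
                    | cons h => exact ih h
                    | rel h => exact lt_irrefl _ h

lemma pvListLt_trans {a b c : List Int} (h1 : a < b) (h2 : b < c) : a < c := by
  induction a generalizing b c with
  | nil =>
    cases h2 with
    | nil => cases h1
    | cons _ => exact List.Lex.nil
    | rel _ => exact List.Lex.nil
  | cons x xs ih =>
    cases h1 with
    | cons h1' =>
      cases h2 with
      | cons h2' => exact List.Lex.cons (ih h1' h2')
      | rel h2' => exact List.Lex.rel h2'
    | rel h1' =>
      cases h2 with
      | cons h2' => exact List.Lex.rel h1'
      | rel h2' => exact List.Lex.rel (lt_trans h1' h2')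

lemma pvListLt_connex {a b : List Int} (h1 : ¬ a < b) (h2 : ¬ b < a) : a = b := by
  induction a generalizing b with
  | nil => cases b with
           | nil => rfl
           | cons y ys => exact absurd List.Lex.nil h1
  | cons x xs ih =>
    cases b with
    | nil => exact absurd List.Lex.nil h2
    | cons y ys =>
      rcases lt_trichotomy x y with h | rfl | h
      · exact absurd (List.Lex.rel h) h1
      · have := ih (fun h => h1 (List.Lex.cons h)) (fun h => h2 (List.Lex.cons h))
        rw [this]
      · exact absurd (List.Lex.rel h) h2

-- the head of A's descending sort is a maximum of win_cases
def pvHeadMax (acc : List (List Int)) : Prop :=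
  match acc with
  | [] => True
  | h :: _ => ∀ y ∈ acc, ¬ h < y

lemma pvHeadMax_insertBy (x : List Int) (acc : List (List Int)) (hp : pvHeadMax acc) :
    pvHeadMax (PySem.List.insertBy (fun a b => decide (b < a)) x acc) := by
  cases acc with
  | nil =>
    intro y hy
    have hyx : y = x := by simpa [PySem.List.insertBy] using hy
    subst hyx
    exact pvListLt_irrefl _
  | cons h t =>
    rw [show PySem.List.insertBy (fun a b => decide (b < a)) x (h :: t)
        = if decide (h < x) = true then x :: h :: t
          else h :: PySem.List.insertBy (fun a b => decide (b < a)) x t from by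
      simp [PySem.List.insertBy]]
    split
    next hlt =>
      rw [decide_eq_true_eq] at hlt
      intro y hy
      rcases List.mem_cons.mp hy with rfl | hy'
      · exact pvListLt_irrefl y
      · intro hxy
        exact (hp y hy') (pvListLt_trans hlt hxy)
    next hlt =>
      simp only [decide_eq_true_eq] at hlt
      intro y hy
      rcases List.mem_cons.mp hy with rfl | hy'
      · exact pvListLt_irrefl y
      · rcases (PySem.List.mem_insertBy _ _ _ _).mp hy' with rfl | hy''
        · exact hlt
        · exact hp y (List.mem_cons_of_mem _ hy'')

lemma pvHeadMax_foldl (xs : List (List Int)) (acc : List (List Int)) (hp : pvHeadMax acc) :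
    pvHeadMax (xs.foldl (fun acc x => PySem.List.insertBy (fun a b => decide (b < a)) x acc) acc) := by
  induction xs generalizing acc with
  | nil => exact hp
  | cons x xs ih => exact ih _ (pvHeadMax_insertBy x acc hp)

lemma pvSorted_head_max (wc : List (List Int)) {m : List Int} {t : List (List Int)}
    (h : PySem.List.sorted wc (fun x => x) true = m :: t) :
    m ∈ wc ∧ ∀ y ∈ wc, ¬ m < y := by
  constructor
  · have := PySem.List.mem_sorted (xs := wc) (key := fun x => x) (rev := true) (x := m)
    rw [h] at this
    exact this.mp (by simp)
  · intro y hy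
    have hmem : y ∈ m :: t := by
      rw [← h, PySem.List.mem_sorted]; exact hy
    have hmax : pvHeadMax (m :: t) := by
      rw [← h, PySem.List.sorted_rev_eq_foldl_insertBy]
      exact pvHeadMax_foldl wc [] trivial
    exact hmax y hmem

-- relation between A's (gap, win_cases) state and B's best candidate
def pvInv (s : Int × List (List Int)) (best : Option (Int × List Int)) : Prop :=
  (s.1 = 0 ∧ s.2 = [] ∧ best = none) ∨
  ∃ m, best = some (s.1, m) ∧ m ∈ s.2 ∧ (∀ l ∈ s.2, ¬ m < l) ∧ 1 ≤ s.1

lemma pvInv_upd (s : Int × List (List Int)) (best : Option (Int × List Int))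
    (w : Int × List Int) (hw : 1 ≤ w.1) (h : pvInv s best) :
    pvInv (pvUpdA s w) (pvUpdB best w) := by
  obtain ⟨w1, w2⟩ := w
  obtain ⟨s1, s2⟩ := s
  simp only at hw
  rcases h with ⟨hs1, hs2, rfl⟩ | ⟨m, rfl, hm, hmax, hg⟩
  · simp only at hs1 hs2
    subst hs1; subst hs2
    have hA : pvUpdA (0, []) (w1, w2) = (w1, [w2]) := by
      simp [pvUpdA]; omega
    rw [hA]
    right
    exact ⟨w2, rfl, by simp, by
      intro l hl; simp at hl; subst hl; exact pvListLt_irrefl _, hw⟩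
  · simp only at hm hmax hg ⊢
    by_cases h1 : s1 < w1
    · have hA : pvUpdA (s1, s2) (w1, w2) = (w1, [w2]) := by simp [pvUpdA, h1]
      have hB : pvUpdB (some (s1, m)) (w1, w2) = some (w1, w2) := by
        simp [pvUpdB, pvPairLt, h1]
      rw [hA, hB]
      right
      exact ⟨w2, rfl, by simp, by
        intro l hl; simp at hl; subst hl; exact pvListLt_irrefl _, hw⟩
    · by_cases h2 : s1 = w1
      · have hA : pvUpdA (s1, s2) (w1, w2) = (s1, s2 ++ [w2]) := by
          simp [pvUpdA, h1, h2]
        rw [hA]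
        by_cases h3 : m < w2
        · have hB : pvUpdB (some (s1, m)) (w1, w2) = some (w1, w2) := by
            simp [pvUpdB, pvPairLt, h2, h3]
          rw [hB, h2]
          right
          refine ⟨w2, rfl, by simp, ?_, by omega⟩
          intro l hl
          rcases List.mem_append.mp hl with hl | hl
          · intro hlt; exact hmax l hl (pvListLt_trans h3 hlt)
          · simp at hl; subst hl; exact pvListLt_irrefl _
        · have hB : pvUpdB (some (s1, m)) (w1, w2) = some (s1, m) := by
            simp [pvUpdB, pvPairLt, h1, h3]
          rw [hB]
          right
          refine ⟨m, rfl, by simp [hm], ?_, hg⟩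
          intro l hl
          rcases List.mem_append.mp hl with hl | hl
          · exact hmax l hl
          · simp at hl; subst hl; exact h3
      · have hA : pvUpdA (s1, s2) (w1, w2) = (s1, s2) := by simp [pvUpdA, h1, h2]
        have hB : pvUpdB (some (s1, m)) (w1, w2) = some (s1, m) := by
          simp [pvUpdB, pvPairLt, h1, h2]
        rw [hA, hB]
        right
        exact ⟨m, rfl, hm, hmax, hg⟩

lemma pvInv_fold (ws : List (Int × List Int)) (hws : ∀ w ∈ ws, 1 ≤ w.1)
    (s : Int × List (List Int)) (best : Option (Int × List Int)) (h : pvInv s best) :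
    pvInv (List.foldl pvUpdA s ws) (List.foldl pvUpdB best ws) := by
  induction ws generalizing s best with
  | nil => exact h
  | cons w ws ih =>
    exact ih (fun x hx => hws x (List.mem_cons_of_mem _ hx)) _ _
      (pvInv_upd s best w (hws w (List.mem_cons_self)) h)

-- ===== VERDICT (by name: the statement is the Claim_ definition above) =====
theorem solution_spec : Claim_equal_solution := by
  intro n info _ _
  show (if (List.foldl (pvStepA info.reverse n) (0, []) (pvAllCases 10)).2 = [] then [-1]
      else ((PySem.List.sorted (List.foldl (pvStepA info.reverse n) (0, [])
        (pvAllCases 10)).2 (fun x => x) true).headD []).reverse)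
    = match pvDfsB info.reverse 10 n [] 0 0 none with
      | none => [-1]
      | some b => b.2.reverse
  have hlen : ∀ c ∈ pvAllCases 10, c.length = 10 := fun c hc => pvAllCases_length hc
  rw [pvFoldA_eq info.reverse n _ _ hlen, pvDfsB_eq]
  have h10 : (11 : Int) - ((10 : Nat) : Int) = 1 := by norm_num
  rw [h10]
  have hwseq : (pvAllCases 10).filterMap (fun c =>
      (pvCaseOut info.reverse c 1 n 0 0).bind (pvMkWin []))
      = pvWins info.reverse 10 1 n 0 0 [] := rfl
  rw [hwseq]
  set ws := pvWins info.reverse 10 1 n 0 0 [] with hws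
  have hinv : pvInv (List.foldl pvUpdA (0, []) ws) (List.foldl pvUpdB none ws) :=
    pvInv_fold ws (fun w hw => pvWins_gap_ge_one info.reverse 10 1 n 0 0 [] hw) _ _
      (Or.inl ⟨rfl, rfl, rfl⟩)
  rcases hinv with ⟨-, h2, h3⟩ | ⟨m, hbm, hm, hmax, -⟩
  · rw [h3, if_pos h2]
  · rw [hbm]
    have hne : (List.foldl pvUpdA (0, []) ws).2 ≠ [] := List.ne_nil_of_mem hm
    rw [if_neg hne]
    obtain ⟨m', t, heq⟩ : ∃ m' t, PySem.List.sorted (List.foldl pvUpdA (0, []) ws).2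
        (fun x => x) true = m' :: t := by
      cases hs : PySem.List.sorted (List.foldl pvUpdA (0, []) ws).2 (fun x => x) true with
      | nil => exact absurd ((PySem.List.sorted_eq_nil_iff _ _ _).mp hs) hne
      | cons m' t => exact ⟨m', t, rfl⟩
    obtain ⟨hm'mem, hm'max⟩ := pvSorted_head_max _ heq
    have hmm : m = m' := pvListLt_connex (hmax m' hm'mem) (hm'max m hm)
    rw [heq]
    simp [← hmm]
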